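-- pv_equiv track=rewrite | github.com/PSF-UFRJ/global-ufrj | comp-1/exercicios/Test2-classe.py | fatorial_impar
-- ===== SOURCE A (Python) =====
-- def fatorial_impar(num):
--     """Retorna o fatorial impar de um número, que é o fatorial calculado apenas
--     com números impares. Exemplos:
--     fatorial_impar(10) = 9 * 7 * 5 * 3 * 1
--     fatorial_impar(17) = 17 * 15 * 13 * 11 * 9 * 7 * 5 * 3 * 1
--
--     Mais exemplos:
--     >>> fatorial_impar(11)
--     10395
--     >>> fatorial_impar(19)
--     654729075
--     >>> fatorial_impar(0)
--     1
--     """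
--     i = abs(num)
--     res = 1
--
--     if i == 0 or i == 1:
--         return 1
--
--     if i % 2 == 0:
--         i = i - 1
--
--     while i >= 1:
--         res *= i
--         i = i - 2
--
--     return res
-- ===== SOURCE B (Python) =====
-- def _oddprod(a, n):
--     """Product of the n odd numbers 2*(a+i)+1 for i = 0..n-1, by halving the count."""
--     if n == 0:
--         return 1
--     if n == 1:
--         return 2 * a + 1
--     h = n // 2
--     return _oddprod(a, h) * _oddprod(a + h, n - h)
--
-- def fatorial_impar(num):
--     v = abs(num)
--     if v % 2 == 0:
--         v -= 1
--     if v < 1: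
--         return 1
--     return _oddprod(0, (v - 1) // 2 + 1)
-- ===== Notes on version B (the rewrite author's own statement) =====
-- stated objective: faster
-- what changed: Replaces A's sequential step-by-2 accumulation loop with a divide-and-conquer balanced product tree over the odd factors, which keeps big-integer operands balanced in size.
import Mathlib
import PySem

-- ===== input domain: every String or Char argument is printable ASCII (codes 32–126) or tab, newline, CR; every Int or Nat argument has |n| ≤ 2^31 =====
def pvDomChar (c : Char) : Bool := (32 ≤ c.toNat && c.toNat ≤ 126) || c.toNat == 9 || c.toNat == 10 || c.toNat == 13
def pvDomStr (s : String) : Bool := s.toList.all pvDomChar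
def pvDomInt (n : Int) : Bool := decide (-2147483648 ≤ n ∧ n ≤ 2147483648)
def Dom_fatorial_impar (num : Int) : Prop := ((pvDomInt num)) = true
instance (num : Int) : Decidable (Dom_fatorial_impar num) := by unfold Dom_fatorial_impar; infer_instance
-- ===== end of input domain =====

-- B computes the odd double factorial by a divide-and-conquer balanced product tree over the odd factors instead of A's sequential step-by-2 loop (faster on big integers).

-- ===== PORT A =====
-- the while loop: res *= i; i -= 2 while i >= 1
def fatorialLoopA (i res : Int) : Int :=
  if _h : 1 ≤ i then fatorialLoopA (i - 2) (res * i) else res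
termination_by i.toNat
decreasing_by omega

def fatorial_impar (num : Int) : Int :=
  let i : Int := |num|
  if i = 0 ∨ i = 1 then 1
  else
    -- i ≥ 0 here, so Lean's % matches Python's % exactly
    fatorialLoopA (if i % 2 = 0 then i - 1 else i) 1

-- ===== PORT B =====
-- _oddprod: product of the n odd numbers 2*(a+i)+1, by halving the count.
-- The count parameter n is ≥ 0 at every call, so Nat represents Python's int exactly
-- (and Nat's / and - agree with Python's // and - on these calls: h = n//2 ≤ n).
def oddprodB (a : Int) (n : Nat) : Int :=
  if _h1 : n = 0 then 1
  else if _h2 : n = 1 then 2 * a + 1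
  else
    oddprodB a (n / 2) * oddprodB (a + (n / 2 : Nat)) (n - n / 2)
termination_by n
decreasing_by
  · omega
  · omega

def fatorial_impar_alt (num : Int) : Int :=
  let v0 : Int := |num|
  let v : Int := if v0 % 2 = 0 then v0 - 1 else v0   -- v0 ≥ 0, so % matches Python
  if v < 1 then 1
  else
    -- the count (v-1)//2 + 1 is ≥ 1 here, so .toNat is exact
    oddprodB 0 (PySem.Int.floordiv (v - 1) 2 + 1).toNat

-- ===== PRECONDITION & SPEC =====
def Spec_fatorial_impar (num : Int) (out : Int) : Prop := out = fatorial_impar_alt num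
instance (num : Int) (out : Int) : Decidable (Spec_fatorial_impar num out) := by unfold Spec_fatorial_impar; infer_instance

-- ===== CLAIM (what is proved, stated in full; the proofs are below) =====
def Claim_equal_fatorial_impar : Prop := ∀ (num : Int), Dom_fatorial_impar num → Spec_fatorial_impar num (fatorial_impar num)

-- ===== LEMMAS AND PROOFS =====

-- the odd double factorial 1*3*...*(2k+1)
def oddP : Nat → Nat
  | 0 => 1
  | k+1 => (2*(k+1)+1) * oddP k

theorem loopA_eq (k : Nat) : ∀ res : Int, fatorialLoopA ((2*k+1 : Nat) : Int) res = res * (oddP k : Int) := by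
  induction k with
  | zero =>
    intro res
    rw [fatorialLoopA]
    norm_num
    rw [fatorialLoopA]
    norm_num [oddP]
  | succ k ih =>
    intro res
    rw [fatorialLoopA]
    have h1 : (1 : Int) ≤ ((2*(k+1)+1 : Nat) : Int) := by push_cast; omega
    rw [dif_pos h1]
    have e : ((2*(k+1)+1 : Nat) : Int) - 2 = ((2*k+1 : Nat) : Int) := by push_cast; ring
    rw [e, ih]
    simp only [oddP]
    push_cast
    ring

-- g2 a n = product of 2*(a+i)+1 for i < n
def g2 : Int → Nat → Int
  | _, 0 => 1
  | a, n+1 => g2 a n * (2*(a + n) + 1)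

theorem g2_append (a : Int) (m : Nat) : ∀ n : Nat, g2 a (m + n) = g2 a m * g2 (a + m) n := by
  intro n
  induction n with
  | zero => simp [g2]
  | succ n ih =>
    show g2 a ((m + n) + 1) = _
    rw [g2, ih, g2]
    push_cast
    ring

theorem oddprodB_eq (n : Nat) : ∀ (a : Int), oddprodB a n = g2 a n := by
  induction n using Nat.strong_induction_on with
  | _ n IH =>
    intro a
    rw [oddprodB]
    by_cases h0 : n = 0
    · rw [dif_pos h0]
      simp [h0, g2]
    · rw [dif_neg h0]
      by_cases h1 : n = 1
      · rw [dif_pos h1]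
        simp [h1, g2]
      · rw [dif_neg h1]
        rw [IH (n / 2) (by omega), IH (n - n / 2) (by omega)]
        rw [← g2_append a (n / 2) (n - n / 2)]
        congr 1
        omega

theorem g2_zero (k : Nat) : g2 0 (k + 1) = (oddP k : Int) := by
  induction k with
  | zero => simp [g2, oddP]
  | succ k ih =>
    rw [g2, ih]
    simp only [oddP]
    push_cast
    ring

-- ===== VERDICT (by name: the statement is the Claim_ definition above) =====
theorem fatorial_impar_spec : Claim_equal_fatorial_impar := by
  unfold Claim_equal_fatorial_impar Spec_fatorial_impar
  intro num _
  unfold fatorial_impar fatorial_impar_alt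
  have habs : |num| = (num.natAbs : Int) := Int.abs_eq_natAbs num
  rw [habs]
  generalize num.natAbs = n
  rcases Nat.lt_or_ge n 2 with h | h
  · have hf0 : PySem.Int.floordiv 0 2 = 0 := by
      rw [PySem.Int.floordiv_eq_ediv_of_pos (by norm_num)]
      decide
    interval_cases n
    · norm_num
    · norm_num [hf0]
      rw [oddprodB]
      norm_num
  · have hne : ¬ ((n:Int) = 0 ∨ (n:Int) = 1) := by omega
    rw [if_neg hne]
    obtain ⟨k, hk⟩ : ∃ k : Nat, (if (n:Int) % 2 = 0 then (n:Int) - 1 else (n:Int)) = ((2*k+1 : Nat) : Int) := by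
      by_cases hpar : (n:Int) % 2 = 0
      · refine ⟨n/2 - 1, ?_⟩; rw [if_pos hpar]; omega
      · refine ⟨n/2, ?_⟩; rw [if_neg hpar]; omega
    simp only []
    rw [hk, loopA_eq]
    have hv1 : ¬ (((2*k+1 : Nat) : Int) < 1) := by push_cast; omega
    rw [if_neg hv1]
    have hm : PySem.Int.floordiv (((2*k+1 : Nat) : Int) - 1) 2 = (k : Int) := by
      rw [PySem.Int.floordiv_eq_ediv_of_pos (by norm_num)]
      push_cast; omega
    rw [hm]
    have htn : ((k : Int) + 1).toNat = k + 1 := by omega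
    rw [htn, oddprodB_eq (k + 1) 0, g2_zero]
    ring
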